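-- pv_equiv track=rewrite | github.com/MadDanWithABox/aoc-2025 | day4/solution.py | process_roll_rack
-- ===== SOURCE A (Python) =====
-- def count_at_neighbors(grid, row, col):
--     """
--     Counts the number of '@' characters in the 8-directional Moore neighborhood
--     of the cell at (row, col).
--
--     Args:
--         grid (list[list[str]]): The 2D grid .
--         row (int): The row index of the central cell.
--         col (int): The column index of the central cell.
--
--     Returns:
--         int: The total count of '@' neighbors.
--     """
--
--     # Define the 8 relative offsets (Delta_r, Delta_c) for the Moore neighborhood
--     offsets = [
--         (-1, -1), (-1, 0), (-1, 1),
--         ( 0, -1),          ( 0, 1),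
--         ( 1, -1), ( 1, 0), ( 1, 1)
--     ]
--
--     at_count = 0
--     num_rows = len(grid)    # Should be 10
--     num_cols = len(grid[0]) # Should be 10
--
--     for dr, dc in offsets:
--         # Calculate the coordinates of the potential neighbor
--         neighbor_r = row + dr
--         neighbor_c = col + dc
--
--         # ensure the neighbor's row index is within the grid bounds (0 to num_rows-1)
--         # Ensure the neighbors col index is within the grid bounds (0 to num_cols-1)
--         is_valid_r = 0 <= neighbor_r < num_rows
--         is_valid_c = 0 <= neighbor_c < num_cols
--
--         if is_valid_r and is_valid_c:
--             if grid[neighbor_r][neighbor_c] == '@':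
--                 at_count += 1
--
--     return at_count
--
-- def process_roll_rack(input_grid, threshold=8):
--     num_rows = len(input_grid)
--     if num_rows == 0:
--         return []
--     low_count_positions = 0
--     num_cols = len(input_grid[0])
--     result_grid = [[0] * num_cols for _ in range(num_rows)]
--
--     for row in range(num_rows):
--         for col in range(num_cols):
--             if input_grid[row][col] == '@':
--                 count = count_at_neighbors(input_grid, row, col)
--                 result_grid[row][col] = count
--                 if count < threshold:
--                     low_count_positions += 1
--     return result_grid, low_count_positions
-- ===== SOURCE B (Python) =====
-- def process_roll_rack(input_grid, threshold=8):
--     num_rows = len(input_grid)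
--     if num_rows == 0:
--         return [], 0
--     num_cols = len(input_grid[0])
--     # 0/1 indicator grid for '@', truncated to num_cols columns
--     ind = [[1 if input_grid[r][c] == '@' else 0 for c in range(num_cols)]
--            for r in range(num_rows)]
--     zero = [0] * num_cols
--     # vertical pass of the separable 3x3 box filter:
--     # vs[r][c] = ind[r-1][c] + ind[r][c] + ind[r+1][c] (out-of-grid rows count 0)
--     vs = []
--     for r in range(num_rows):
--         above = ind[r - 1] if r > 0 else zero
--         below = ind[r + 1] if r + 1 < num_rows else zero
--         cur = ind[r]
--         vs.append([above[c] + cur[c] + below[c] for c in range(num_cols)])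
--     # horizontal pass + tally: neighbor count = 3x3 window sum minus the center
--     result_grid = []
--     low_count_positions = 0
--     for r in range(num_rows):
--         row_v = vs[r]
--         indr = ind[r]
--         out_row = []
--         for c in range(num_cols):
--             if indr[c] != 0:
--                 cnt = ((row_v[c - 1] if c > 0 else 0)
--                        + row_v[c]
--                        + (row_v[c + 1] if c + 1 < num_cols else 0)
--                        - 1)
--                 out_row.append(cnt)
--                 if cnt < threshold:
--                     low_count_positions += 1
--             else:
--                 out_row.append(0)
--         result_grid.append(out_row)
--     return result_grid, low_count_positions
-- ===== Notes on version B (the rewrite author's own statement) =====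
-- stated objective: alternative
-- what changed: B replaces A's per-'@'-cell scan over 8 explicit bounds-checked offsets with a separable 3x3 box filter: a vertical pass precomputes three-row column sums, then one horizontal pass gets each neighbor count as a clamped three-term sum minus the center.
-- outside the precondition, e.g. on process_roll_rack([], 8): A returns (), B returns ([], 0)
import Mathlib
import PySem

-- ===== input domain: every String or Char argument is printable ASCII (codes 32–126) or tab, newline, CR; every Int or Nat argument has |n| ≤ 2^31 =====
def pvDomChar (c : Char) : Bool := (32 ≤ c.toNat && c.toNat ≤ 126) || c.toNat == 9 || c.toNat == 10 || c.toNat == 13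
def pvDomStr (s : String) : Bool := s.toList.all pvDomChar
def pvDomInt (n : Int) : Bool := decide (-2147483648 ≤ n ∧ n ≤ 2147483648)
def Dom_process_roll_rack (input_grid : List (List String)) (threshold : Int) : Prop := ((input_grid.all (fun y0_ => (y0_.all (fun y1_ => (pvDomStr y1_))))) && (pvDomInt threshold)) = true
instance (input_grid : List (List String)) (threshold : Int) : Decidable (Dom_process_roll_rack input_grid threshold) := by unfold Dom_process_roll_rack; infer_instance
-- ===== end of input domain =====

-- B replaces A's per-'@'-cell scan over 8 explicit offsets with a separable 3x3 box filter
-- (a vertical-sums pass, then a horizontal pass subtracting the center); equal values on Pre_.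

-- ===== PORT A =====
-- len(grid[0]) (both Pythons compute it this way; `.getD []` stands for the IndexError on an
-- empty grid, which is never reached where either Python evaluates it inside Pre_)
def pvCols (g : List (List String)) : Nat := ((PySem.List.pyGet? g 0).getD []).length

-- grid[r][c] as an Option (none exactly where Python's chained indexing raises)
def pvCell (g : List (List String)) (r c : Int) : Option String :=
  (PySem.List.pyGet? g r).bind (fun row => PySem.List.pyGet? row c)

def pv_offsets : List (Int × Int) :=
  [(-1,-1), (-1,0), (-1,1), (0,-1), (0,1), (1,-1), (1,0), (1,1)]

def count_at_neighbors (grid : List (List String)) (row col : Int) : Int :=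
  pv_offsets.foldl (fun at_count d =>
    let neighbor_r := row + d.1
    let neighbor_c := col + d.2
    if (0 ≤ neighbor_r ∧ neighbor_r < (grid.length : Int)) ∧
       (0 ≤ neighbor_c ∧ neighbor_c < (pvCols grid : Int)) then
      (if pvCell grid neighbor_r neighbor_c = some "@" then at_count + 1 else at_count)
    else at_count) 0

def process_roll_rack (input_grid : List (List String)) (threshold : Int) : List (List Int) × Int :=
  if input_grid.length = 0 then ([], 0)   -- Python returns a bare [] here (not a pair); excluded by Pre_
  else
    (List.range input_grid.length).foldl (fun (st : List (List Int) × Int) (r : Nat) =>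
      let inner := (List.range (pvCols input_grid)).foldl (fun (rs : List Int × Int) (c : Nat) =>
        if pvCell input_grid (r : Int) (c : Int) = some "@" then
          let count := count_at_neighbors input_grid (r : Int) (c : Int)
          (rs.1 ++ [count], if count < threshold then rs.2 + 1 else rs.2)
        else (rs.1 ++ [0], rs.2)) ([], st.2)
      (st.1 ++ [inner.1], inner.2)) ([], 0)

-- ===== PORT B =====
-- `List.getD` stands for Python's in-range list indexing (every index B uses is in range inside Pre_).
-- Source B's `ind` comprehension: 0/1 indicator of '@', truncated to the first-row width
def pvIndGrid (g : List (List String)) : List (List Int) :=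
  (List.range g.length).map (fun r =>
    (List.range (pvCols g)).map (fun c =>
      if (g.getD r []).getD c "" = "@" then 1 else 0))

-- Source B's `zero`
def pvZeroRow (g : List (List String)) : List Int := List.replicate (pvCols g) 0

-- Source B's vertical pass `vs`: vs[r][c] = ind[r-1][c] + ind[r][c] + ind[r+1][c], out-of-grid rows 0
def pvVs (g : List (List String)) : List (List Int) :=
  (List.range g.length).map (fun r =>
    let above := if 0 < r then (pvIndGrid g).getD (r - 1) (pvZeroRow g) else pvZeroRow g
    let below := if r + 1 < g.length then (pvIndGrid g).getD (r + 1) (pvZeroRow g) else pvZeroRow g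
    let cur := (pvIndGrid g).getD r (pvZeroRow g)
    (List.range (pvCols g)).map (fun c => above.getD c 0 + cur.getD c 0 + below.getD c 0))

def process_roll_rack_alt (input_grid : List (List String)) (threshold : Int) : List (List Int) × Int :=
  if input_grid.length = 0 then ([], 0)
  else
    (List.range input_grid.length).foldl (fun (st : List (List Int) × Int) (r : Nat) =>
      let row_v := (pvVs input_grid).getD r (pvZeroRow input_grid)
      let indr := (pvIndGrid input_grid).getD r (pvZeroRow input_grid)
      let inner := (List.range (pvCols input_grid)).foldl (fun (rs : List Int × Int) (c : Nat) =>
        if indr.getD c 0 ≠ 0 then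
          let cnt := (if 0 < c then row_v.getD (c - 1) 0 else 0) + row_v.getD c 0 +
                     (if c + 1 < pvCols input_grid then row_v.getD (c + 1) 0 else 0) - 1
          (rs.1 ++ [cnt], if cnt < threshold then rs.2 + 1 else rs.2)
        else (rs.1 ++ [0], rs.2)) ([], st.2)
      (st.1 ++ [inner.1], inner.2)) ([], 0)

-- ===== PRECONDITION & SPEC =====
-- Pre_ excludes the empty grid, where A returns a bare list [] instead of a (grid, count) pair,
-- and ragged grids in which some row is shorter than the first row, where A raises IndexError.
def Pre_process_roll_rack (input_grid : List (List String)) (threshold : Int) : Prop :=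
  input_grid ≠ [] ∧ ∀ row ∈ input_grid, pvCols input_grid ≤ row.length
instance (input_grid : List (List String)) (threshold : Int) : Decidable (Pre_process_roll_rack input_grid threshold) := by unfold Pre_process_roll_rack; infer_instance

def pvWitness_process_roll_rack : List (List String) × Int := ([["@", "."], [".", "@"]], 8)

def Spec_process_roll_rack (input_grid : List (List String)) (threshold : Int) (out : List (List Int) × Int) : Prop := out = process_roll_rack_alt input_grid threshold
instance (input_grid : List (List String)) (threshold : Int) (out : List (List Int) × Int) : Decidable (Spec_process_roll_rack input_grid threshold out) := by unfold Spec_process_roll_rack; infer_instance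

-- ===== CLAIM (what is proved, stated in full; the proofs are below) =====
def Claim_equal_process_roll_rack : Prop := ∀ (input_grid : List (List String)) (threshold : Int), Dom_process_roll_rack input_grid threshold → Pre_process_roll_rack input_grid threshold → Spec_process_roll_rack input_grid threshold (process_roll_rack input_grid threshold)

-- ===== LEMMAS AND PROOFS =====

-- bounded '@' indicator at Int coordinates (0 outside the grid / outside the first-row width)
def pvNbr (g : List (List String)) (r c : Int) : Int :=
  if ((0 ≤ r ∧ r < (g.length : Int)) ∧ (0 ≤ c ∧ c < (pvCols g : Int))) ∧ pvCell g r c = some "@"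
  then 1 else 0

theorem pvNbr_step (g : List (List String)) (a r' c' : Int) :
    (if (0 ≤ r' ∧ r' < (g.length : Int)) ∧ (0 ≤ c' ∧ c' < (pvCols g : Int)) then
      (if pvCell g r' c' = some "@" then a + 1 else a)
    else a) = a + pvNbr g r' c' := by
  unfold pvNbr
  split_ifs <;> first | omega | tauto

theorem count_eq_sum_nbr (g : List (List String)) (r c : Int) :
    count_at_neighbors g r c =
      pvNbr g (r - 1) (c - 1) + pvNbr g (r - 1) c + pvNbr g (r - 1) (c + 1) +
      pvNbr g r (c - 1) + pvNbr g r (c + 1) +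
      pvNbr g (r + 1) (c - 1) + pvNbr g (r + 1) c + pvNbr g (r + 1) (c + 1) := by
  simp only [count_at_neighbors, pv_offsets, List.foldl_cons, List.foldl_nil, pvNbr_step]
  ring_nf

theorem pvZeroRow_getD (g : List (List String)) (c : Nat) : (pvZeroRow g).getD c 0 = 0 := by
  simp [pvZeroRow, List.getD]

theorem pvCell_eq (g : List (List String)) (hlen : ∀ row ∈ g, pvCols g ≤ row.length)
    {r c : Nat} (hr : r < g.length) (hc : c < pvCols g) :
    pvCell g (r : Int) (c : Int) = some ((g.getD r []).getD c "") := by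
  have hrow : c < (g[r]).length := lt_of_lt_of_le hc (hlen _ (List.getElem_mem hr))
  rw [List.getD_eq_getElem g [] hr, List.getD_eq_getElem _ "" hrow]
  simp [pvCell, List.getElem?_eq_getElem hr, List.getElem?_eq_getElem hrow]

theorem pvIndGrid_getD (g : List (List String)) {r c : Nat}
    (hr : r < g.length) (hc : c < pvCols g) :
    ((pvIndGrid g).getD r (pvZeroRow g)).getD c 0 =
      (if (g.getD r []).getD c "" = "@" then (1:Int) else 0) := by
  rw [pvIndGrid, PySem.List.getD_map_range _ _ _ _ hr, PySem.List.getD_map_range _ _ _ _ hc]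

theorem pvNbr_in_range (g : List (List String)) (hlen : ∀ row ∈ g, pvCols g ≤ row.length)
    {r c : Nat} (hr : r < g.length) (hc : c < pvCols g) :
    pvNbr g (r : Int) (c : Int) = (if (g.getD r []).getD c "" = "@" then (1:Int) else 0) := by
  unfold pvNbr
  rw [pvCell_eq g hlen hr hc]
  have h1 : ((0:Int) ≤ (r:Int) ∧ (r:Int) < (g.length : Int)) ∧
      ((0:Int) ≤ (c:Int) ∧ (c:Int) < (pvCols g : Int)) := by
    refine ⟨⟨by omega, ?_⟩, ⟨by omega, ?_⟩⟩ <;> exact_mod_cast ‹_ < _›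
  simp [h1]

theorem pvNbr_out_row (g : List (List String)) {r : Int} (c : Int)
    (h : ¬ (0 ≤ r ∧ r < (g.length : Int))) : pvNbr g r c = 0 := by
  unfold pvNbr; rw [if_neg]; tauto

theorem pvNbr_out_col (g : List (List String)) (r : Int) {c : Int}
    (h : ¬ (0 ≤ c ∧ c < (pvCols g : Int))) : pvNbr g r c = 0 := by
  unfold pvNbr; rw [if_neg]; tauto

-- the vertical pass computes the three-row column sums of the bounded indicator
theorem pvVs_getD (g : List (List String)) (hlen : ∀ row ∈ g, pvCols g ≤ row.length)
    {r c : Nat} (hr : r < g.length) (hc : c < pvCols g) :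
    ((pvVs g).getD r (pvZeroRow g)).getD c 0 =
      pvNbr g ((r:Int) - 1) (c:Int) + pvNbr g (r:Int) (c:Int) + pvNbr g ((r:Int) + 1) (c:Int) := by
  rw [pvVs, PySem.List.getD_map_range _ _ _ _ hr]
  simp only []
  rw [PySem.List.getD_map_range _ _ _ _ hc]
  have habove : (if 0 < r then (pvIndGrid g).getD (r - 1) (pvZeroRow g) else pvZeroRow g).getD c 0
      = pvNbr g ((r:Int) - 1) (c:Int) := by
    by_cases h0 : 0 < r
    · rw [if_pos h0, pvIndGrid_getD g (by omega : r - 1 < g.length) hc]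
      have hcast : ((r - 1 : Nat) : Int) = (r:Int) - 1 := by omega
      rw [← hcast, pvNbr_in_range g hlen (by omega : r - 1 < g.length) hc]
    · rw [if_neg h0, pvZeroRow_getD, pvNbr_out_row]
      omega
  have hbelow : (if r + 1 < g.length then (pvIndGrid g).getD (r + 1) (pvZeroRow g) else pvZeroRow g).getD c 0
      = pvNbr g ((r:Int) + 1) (c:Int) := by
    by_cases h1 : r + 1 < g.length
    · rw [if_pos h1, pvIndGrid_getD g h1 hc]
      have hcast : ((r + 1 : Nat) : Int) = (r:Int) + 1 := by omega
      rw [← hcast, pvNbr_in_range g hlen h1 hc]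
    · rw [if_neg h1, pvZeroRow_getD, pvNbr_out_row]
      omega
  rw [habove, hbelow, pvIndGrid_getD g hr hc, ← pvNbr_in_range g hlen hr hc]

-- per-'@'-cell: B's windowed count equals A's eight-offset count
theorem cell_count_eq (g : List (List String)) (hlen : ∀ row ∈ g, pvCols g ≤ row.length)
    {r c : Nat} (hr : r < g.length) (hc : c < pvCols g)
    (hAt : pvCell g (r:Int) (c:Int) = some "@") :
    (if 0 < c then ((pvVs g).getD r (pvZeroRow g)).getD (c - 1) 0 else 0) +
      ((pvVs g).getD r (pvZeroRow g)).getD c 0 +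
      (if c + 1 < pvCols g then ((pvVs g).getD r (pvZeroRow g)).getD (c + 1) 0 else 0) - 1 =
    count_at_neighbors g (r:Int) (c:Int) := by
  have hcenter : pvNbr g (r:Int) (c:Int) = 1 := by
    unfold pvNbr
    rw [if_pos]
    refine ⟨⟨⟨by omega, by exact_mod_cast hr⟩, by omega, by exact_mod_cast hc⟩, hAt⟩
  have hleft : (if 0 < c then ((pvVs g).getD r (pvZeroRow g)).getD (c - 1) 0 else 0) =
      pvNbr g ((r:Int) - 1) ((c:Int) - 1) + pvNbr g (r:Int) ((c:Int) - 1) +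
      pvNbr g ((r:Int) + 1) ((c:Int) - 1) := by
    by_cases h0 : 0 < c
    · rw [if_pos h0, pvVs_getD g hlen hr (by omega : c - 1 < pvCols g)]
      have : ((c - 1 : Nat) : Int) = (c:Int) - 1 := by omega
      rw [this]
    · rw [if_neg h0]
      rw [pvNbr_out_col g _ (by omega), pvNbr_out_col g _ (by omega), pvNbr_out_col g _ (by omega)]
      omega
  have hright : (if c + 1 < pvCols g then ((pvVs g).getD r (pvZeroRow g)).getD (c + 1) 0 else 0) =
      pvNbr g ((r:Int) - 1) ((c:Int) + 1) + pvNbr g (r:Int) ((c:Int) + 1) +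
      pvNbr g ((r:Int) + 1) ((c:Int) + 1) := by
    by_cases h1 : c + 1 < pvCols g
    · rw [if_pos h1, pvVs_getD g hlen hr h1]
      have : ((c + 1 : Nat) : Int) = (c:Int) + 1 := by omega
      rw [this]
    · rw [if_neg h1]
      have hout : ¬ ((0:Int) ≤ (c:Int) + 1 ∧ (c:Int) + 1 < (pvCols g : Int)) := by omega
      rw [pvNbr_out_col g _ hout, pvNbr_out_col g _ hout, pvNbr_out_col g _ hout]
      omega
  rw [hleft, hright, pvVs_getD g hlen hr hc, hcenter, count_eq_sum_nbr]
  ring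

-- ===== VERDICT (by name: the statement is the Claim_ definition above) =====
theorem process_roll_rack_spec : Claim_equal_process_roll_rack := by
  intro g t _hdom hpre
  obtain ⟨hne, hlen⟩ := hpre
  have hR : ¬ g.length = 0 := by simpa [List.length_eq_zero_iff] using hne
  unfold Spec_process_roll_rack process_roll_rack process_roll_rack_alt
  rw [if_neg hR, if_neg hR]
  refine PySem.List.foldl_congr_mem _ _ _ _ ?_
  intro st r hrmem
  have hr : r < g.length := List.mem_range.mp hrmem
  have hinner :
      (List.range (pvCols g)).foldl (fun (rs : List Int × Int) (c : Nat) =>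
        if pvCell g (r : Int) (c : Int) = some "@" then
          let count := count_at_neighbors g (r : Int) (c : Int)
          (rs.1 ++ [count], if count < t then rs.2 + 1 else rs.2)
        else (rs.1 ++ [0], rs.2)) ([], st.2) =
      (List.range (pvCols g)).foldl (fun (rs : List Int × Int) c =>
        if ((pvIndGrid g).getD r (pvZeroRow g)).getD c 0 ≠ 0 then
          let cnt := (if 0 < c then ((pvVs g).getD r (pvZeroRow g)).getD (c - 1) 0 else 0) +
              ((pvVs g).getD r (pvZeroRow g)).getD c 0 +
              (if c + 1 < pvCols g then ((pvVs g).getD r (pvZeroRow g)).getD (c + 1) 0 else 0) - 1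
          (rs.1 ++ [cnt], if cnt < t then rs.2 + 1 else rs.2)
        else (rs.1 ++ [0], rs.2)) ([], st.2) := by
    refine PySem.List.foldl_congr_mem _ _ _ _ ?_
    intro rs c hcmem
    have hc : c < pvCols g := List.mem_range.mp hcmem
    have hcond : (((pvIndGrid g).getD r (pvZeroRow g)).getD c 0 ≠ 0) ↔
        pvCell g (r:Int) (c:Int) = some "@" := by
      rw [pvIndGrid_getD g hr hc, pvCell_eq g hlen hr hc, Option.some_inj]
      split_ifs with h
      · exact iff_of_true (by norm_num) h
      · exact iff_of_false (by norm_num) h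
    by_cases hAt : pvCell g (r:Int) (c:Int) = some "@"
    · rw [if_pos hAt, if_pos (hcond.mpr hAt)]
      simp only []
      rw [cell_count_eq g hlen hr hc hAt]
    · rw [if_neg hAt, if_neg (fun h => hAt (hcond.mp h))]
  rw [hinner]
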